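-- pv_equiv track=rewrite | github.com/digitalmaxime/Algorithme_avance | tp3/findAPath.py | findNbOfObstructions
-- ===== SOURCE A (Python) =====
-- def findNbOfObstructions(path):
--     if not path:
--         return -1
--     nbOfObstructions = 0
--     highestStudent = path[0]
--     for student in path:
--         if student < highestStudent:
--             nbOfObstructions += 1
--         elif student > highestStudent:
--             highestStudent = student
--     return nbOfObstructions
-- ===== SOURCE B (Python) =====
-- def findNbOfObstructions(path):
--     if not path:
--         return -1
--
--     def count(xs, m):
--         # divide & conquer: obstructions in xs given incoming running max m,
--         # returning (count, max of m and all of xs)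
--         if len(xs) == 1:
--             return (1 if xs[0] < m else 0), (m if m >= xs[0] else xs[0])
--         mid = len(xs) // 2
--         c1, m1 = count(xs[:mid], m)
--         c2, m2 = count(xs[mid:], m1)
--         return c1 + c2, m2
--
--     c, _ = count(path, path[0])
--     return c
-- ===== Notes on version B (the rewrite author's own statement) =====
-- stated objective: alternative
-- what changed: Replaces A's single fused loop (counter + running max in one state) by a recursive divide-and-conquer helper that splits the list in half, counts obstructions in the left half, threads the left half's maximum into the right half, and sums the two counts.
import Mathlib
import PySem

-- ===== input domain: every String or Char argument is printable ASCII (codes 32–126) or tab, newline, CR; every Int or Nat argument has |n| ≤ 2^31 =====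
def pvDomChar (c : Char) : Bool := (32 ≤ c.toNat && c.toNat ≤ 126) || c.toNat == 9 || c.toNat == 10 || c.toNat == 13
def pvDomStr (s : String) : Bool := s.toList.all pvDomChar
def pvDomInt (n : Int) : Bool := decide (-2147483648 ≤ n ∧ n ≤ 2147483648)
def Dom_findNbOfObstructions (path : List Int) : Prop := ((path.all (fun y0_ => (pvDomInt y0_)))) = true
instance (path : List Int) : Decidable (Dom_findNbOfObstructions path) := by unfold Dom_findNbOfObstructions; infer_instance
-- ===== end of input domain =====

-- B replaces A's fused single loop by a divide-and-conquer recursion that splits the list in half and threads the running maximum between halves (alternative decomposition, same O(n) cost).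


-- ===== PORT A =====
-- literal port of A: fold over the whole path carrying (nbOfObstructions, highestStudent)
def findNbOfObstructions (path : List Int) : Int :=
  match path with
  | [] => -1
  | h :: _ =>
    (path.foldl
      (fun (s : Int × Int) student =>
        if student < s.2 then (s.1 + 1, s.2)
        else if student > s.2 then (s.1, student)
        else s)
      (0, h)).1

-- ===== PORT B =====
-- B's recursive helper count(xs, m): obstructions in xs given incoming running max m,
-- and the resulting max.  The [] case is unreachable in B (a totality guard only).
def pvCount : List Int → Int → Int × Int
  | [], m => (0, m)
  | [x], m => ((if x < m then 1 else 0), (if m ≥ x then m else x))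
  | x :: y :: rest, m =>
    let xs := x :: y :: rest
    let mid := xs.length / 2
    let p1 := pvCount (xs.take mid) m
    let p2 := pvCount (xs.drop mid) p1.2
    (p1.1 + p2.1, p2.2)
termination_by xs _ => xs.length
decreasing_by
  · simp; omega
  · simp; omega

def findNbOfObstructions_alt (path : List Int) : Int :=
  match path with
  | [] => -1
  | h :: _ => (pvCount path h).1

-- ===== PRECONDITION & SPEC =====
def Spec_findNbOfObstructions (path : List Int) (out : Int) : Prop := out = findNbOfObstructions_alt path
instance (path : List Int) (out : Int) : Decidable (Spec_findNbOfObstructions path out) := by unfold Spec_findNbOfObstructions; infer_instance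

-- ===== CLAIM (what is proved, stated in full; the proofs are below) =====
def Claim_equal_findNbOfObstructions : Prop := ∀ (path : List Int), Dom_findNbOfObstructions path → Spec_findNbOfObstructions path (findNbOfObstructions path)

-- ===== LEMMAS AND PROOFS =====

-- reference count: obstructions in t given running max m
def pvCnt (m : Int) (t : List Int) : Int :=
  match t with
  | [] => 0
  | x :: xs => (if x < m then 1 else 0) + pvCnt (max m x) xs

theorem pvA_loop (t : List Int) : ∀ (c m : Int),
    (t.foldl (fun (s : Int × Int) student =>
        if student < s.2 then (s.1 + 1, s.2)
        else if student > s.2 then (s.1, student)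
        else s) (c, m)).1 = c + pvCnt m t := by
  induction t with
  | nil => intro c m; simp [pvCnt]
  | cons x xs ih =>
    intro c m
    simp only [List.foldl_cons, pvCnt]
    by_cases h1 : x < m
    · simp [h1, ih, max_eq_left (le_of_lt h1)]; ring
    · by_cases h2 : x > m
      · simp [h1, h2, ih, max_eq_right (le_of_lt h2)]
      · have hxm : x = m := le_antisymm (not_lt.mp h2) (not_lt.mp h1)
        simp [ih, hxm]

theorem pvCnt_append (l : List Int) : ∀ (r : List Int) (m : Int),
    pvCnt m (l ++ r) = pvCnt m l + pvCnt (l.foldl max m) r := by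
  induction l with
  | nil => intro r m; simp [pvCnt]
  | cons x xs ih =>
    intro r m
    simp only [List.cons_append, pvCnt, List.foldl_cons, ih]
    ring

theorem pvCount_eq : ∀ (n : Nat) (xs : List Int), xs.length ≤ n → xs ≠ [] →
    ∀ m, pvCount xs m = (pvCnt m xs, xs.foldl max m) := by
  intro n
  induction n with
  | zero => intro xs hlen hne; cases xs with
    | nil => exact absurd rfl hne
    | cons a t => simp at hlen
  | succ n ih =>
    intro xs hlen hne m
    match xs with
    | [x] =>
      simp only [pvCount, pvCnt, List.foldl_cons, List.foldl_nil, Prod.mk.injEq]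
      refine ⟨by ring, ?_⟩
      by_cases h : m ≥ x
      · simp [h]
      · simp [h, max_eq_right (le_of_lt (not_le.mp h))]
    | x :: y :: rest =>
      rw [pvCount]
      have hlen2 : (x :: y :: rest).length ≥ 2 := by simp
      set l := x :: y :: rest with hl
      set mid := l.length / 2 with hmid
      have hmid1 : 1 ≤ mid := by simp only [hmid, hl, List.length_cons]; omega
      have hmidlt : mid < l.length := by omega
      have htake : (l.take mid).length ≤ n := by simp; omega
      have hdrop : (l.drop mid).length ≤ n := by simp; omega
      have htne : l.take mid ≠ [] := by
        intro h; have := congrArg List.length h; simp at this; omega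
      have hdne : l.drop mid ≠ [] := by
        intro h; have := congrArg List.length h; simp at this; omega
      rw [ih _ htake htne, ih _ hdrop hdne]
      simp only
      have hsplit : l.take mid ++ l.drop mid = l := List.take_append_drop mid l
      simp only [Prod.mk.injEq]
      refine ⟨?_, ?_⟩
      · conv_rhs => rw [← hsplit]
        rw [pvCnt_append]
      · conv_rhs => rw [← hsplit]
        rw [List.foldl_append]

-- ===== VERDICT (by name: the statement is the Claim_ definition above) =====
theorem findNbOfObstructions_spec : Claim_equal_findNbOfObstructions := by
  intro path _
  unfold Spec_findNbOfObstructions findNbOfObstructions findNbOfObstructions_alt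
  match path with
  | [] => rfl
  | h :: t =>
    simp only [List.foldl_cons]
    have h1 : (if h < h then ((0 : Int) + 1, h) else if h > h then ((0 : Int), h) else ((0 : Int), h)) = (0, h) := by
      simp
    rw [h1, pvA_loop]
    rw [pvCount_eq (h :: t).length (h :: t) le_rfl (by simp) h]
    simp only [pvCnt]
    simp
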